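-- pv_equiv track=rewrite | github.com/kostasvar/coco-doc | docs/bbob-biobj/functions/code/generate_plots.py | getAllCornersOfHyperrectangle
-- ===== SOURCE A (Python) =====
-- import copy # needed for getAllCornersOfHyperrectangle(...)
--
-- def getAllCornersOfHyperrectangle(n, b):
--     ''' returns all corners of a hyperrectangle [-b,b]^n
--     '''
--     if (n == 1):
--         s = [[-b],[b]]
--     else:
--         tmp = getAllCornersOfHyperrectangle(n-1, b)
--         s = []
--         for t in tmp:
--             s1 = copy.deepcopy(t)
--             s1.append(-b)
--             s2 = copy.deepcopy(t)
--             s2.append(b)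
--             s.append(s1)
--             s.append(s2)
--     return s
-- ===== SOURCE B (Python) =====
-- def getAllCornersOfHyperrectangle(n, b):
--     ''' returns all corners of a hyperrectangle [-b,b]^n
--         (flat enumeration: corner i read off the binary digits of i,
--         last coordinate varying fastest)
--     '''
--     return [[b if (i // 2 ** (n - 1 - j)) % 2 else -b for j in range(n)]
--             for i in range(2 ** n)]
-- ===== Notes on version B (the rewrite author's own statement) =====
-- stated objective: simpler
-- what changed: Replaced the recursion over the dimension (with deepcopy-and-append extension of every previous corner) by a flat enumeration: corner i of the 2^n corners is built directly from the binary digits of i, in a single comprehension.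
import Mathlib
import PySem

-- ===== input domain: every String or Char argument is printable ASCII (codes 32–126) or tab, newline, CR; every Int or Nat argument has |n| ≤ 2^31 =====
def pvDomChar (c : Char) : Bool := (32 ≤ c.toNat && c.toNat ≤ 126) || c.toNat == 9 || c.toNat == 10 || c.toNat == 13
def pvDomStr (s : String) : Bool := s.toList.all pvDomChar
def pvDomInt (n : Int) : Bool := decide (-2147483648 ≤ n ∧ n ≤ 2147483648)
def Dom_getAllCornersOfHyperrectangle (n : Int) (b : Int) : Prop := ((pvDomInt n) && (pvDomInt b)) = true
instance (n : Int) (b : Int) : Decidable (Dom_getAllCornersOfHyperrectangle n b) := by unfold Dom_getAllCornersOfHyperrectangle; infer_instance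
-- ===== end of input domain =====

-- B replaces A's recursion over the dimension (deepcopy-and-extend of every previous
-- corner) by a flat enumeration reading corner i off the binary digits of i (simpler).

-- ===== PORT A =====
-- Python tests 'n == 1' and recurses on n-1; for n < 1 the Python recursion never
-- terminates (RecursionError, excluded by Pre_), so the guard here is 'n ≤ 1' to make
-- the same computation total — on n ≥ 1 it is the same test.
def getAllCornersOfHyperrectangle (n : Int) (b : Int) : List (List Int) :=
  if n ≤ 1 then [[-b], [b]]
  else
    (getAllCornersOfHyperrectangle (n - 1) b).foldl
      (fun s t => s ++ [t ++ [-b], t ++ [b]]) []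
termination_by n.toNat
decreasing_by omega

-- ===== PORT B =====
-- '2 ** n' and '2 ** (n-1-j)' have nonnegative exponents for every n ≥ 0 (and every
-- j ∈ range(n)), so '.toNat' on the exponents is exact there; 'if … % 2' is Python
-- truthiness, i.e. 'mod … 2 ≠ 0'.
def getAllCornersOfHyperrectangle_alt (n : Int) (b : Int) : List (List Int) :=
  (PySem.List.pyRange 0 ((2 : Int) ^ n.toNat) 1).map (fun i =>
    (PySem.List.pyRange 0 n 1).map (fun j =>
      if PySem.Int.mod (PySem.Int.floordiv i ((2 : Int) ^ (n - 1 - j).toNat)) 2 ≠ 0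
      then b else -b))

-- ===== PRECONDITION & SPEC =====
-- Pre_ excludes n ≤ 0, where the Python A recurses forever (RecursionError).
def Pre_getAllCornersOfHyperrectangle (n : Int) (b : Int) : Prop := 1 ≤ n
instance (n : Int) (b : Int) : Decidable (Pre_getAllCornersOfHyperrectangle n b) := by unfold Pre_getAllCornersOfHyperrectangle; infer_instance
def pvWitness_getAllCornersOfHyperrectangle : Int × Int := (2, 3)

def Spec_getAllCornersOfHyperrectangle (n : Int) (b : Int) (out : List (List Int)) : Prop := out = getAllCornersOfHyperrectangle_alt n b
instance (n : Int) (b : Int) (out : List (List Int)) : Decidable (Spec_getAllCornersOfHyperrectangle n b out) := by unfold Spec_getAllCornersOfHyperrectangle; infer_instance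

-- ===== CLAIM (what is proved, stated in full; the proofs are below) =====
def Claim_equal_getAllCornersOfHyperrectangle : Prop := ∀ (n : Int) (b : Int), Dom_getAllCornersOfHyperrectangle n b → Pre_getAllCornersOfHyperrectangle n b → Spec_getAllCornersOfHyperrectangle n b (getAllCornersOfHyperrectangle n b)

-- ===== LEMMAS AND PROOFS =====

-- reference list of corners of dimension m (last coordinate fastest)
def pvCorners (b : Int) : Nat → List (List Int)
  | 0 => [[]]
  | m + 1 => (pvCorners b m).flatMap (fun t => [t ++ [-b], t ++ [b]])

lemma pvA_eq (b : Int) : ∀ (m : Nat) (n : Int), 1 ≤ n → n.toNat = m + 1 →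
    getAllCornersOfHyperrectangle n b = pvCorners b (m + 1) := by
  intro m
  induction m with
  | zero =>
    intro n h1 hm
    have hn : n = 1 := by omega
    subst hn
    simp [getAllCornersOfHyperrectangle, pvCorners]
  | succ k ih =>
    intro n h1 hm
    have hn2 : ¬ n ≤ 1 := by omega
    rw [getAllCornersOfHyperrectangle, if_neg hn2]
    rw [ih (n - 1) (by omega) (by omega)]
    rw [PySem.List.foldl_append_eq_flatMap]
    simp [pvCorners]

lemma pvRangeTwoMul {α : Type} (K : Nat) (f : Nat → α) :
    (List.range (2 * K)).map f = (List.range K).flatMap (fun q => [f (2 * q), f (2 * q + 1)]) := by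
  induction K with
  | zero => simp
  | succ k ih =>
    have h2 : 2 * (k + 1) = (2 * k + 1) + 1 := by omega
    rw [h2, List.range_succ, List.range_succ, List.map_append, List.map_append, ih,
        List.range_succ, List.flatMap_append]
    simp

lemma pvB_nat (b : Int) : ∀ (m : Nat),
    (List.range (2 ^ m)).map (fun i =>
      (List.range m).map (fun j => if i / 2 ^ (m - 1 - j) % 2 = 1 then b else -b))
    = pvCorners b m := by
  intro m
  induction m with
  | zero => simp [pvCorners]
  | succ k ih =>
    have hpow : 2 ^ (k + 1) = 2 * 2 ^ k := by ring
    rw [hpow, pvRangeTwoMul, pvCorners, ← ih, List.flatMap_map]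
    apply List.flatMap_congr
    intro q _
    have hrow : ∀ r : Nat, r < 2 →
        (List.range (k + 1)).map
          (fun j => if (2 * q + r) / 2 ^ (k + 1 - 1 - j) % 2 = 1 then b else -b)
        = ((List.range k).map (fun j => if q / 2 ^ (k - 1 - j) % 2 = 1 then b else -b))
          ++ [if r = 1 then b else -b] := by
      intro r hr
      rw [List.range_succ, List.map_append]
      congr 1
      · apply List.map_congr_left
        intro j hj
        have hjk : j < k := List.mem_range.mp hj
        have he : k + 1 - 1 - j = (k - 1 - j) + 1 := by omega
        have hdiv : (2 * q + r) / 2 ^ ((k - 1 - j) + 1) = q / 2 ^ (k - 1 - j) := by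
          rw [pow_succ, Nat.mul_comm (2 ^ (k - 1 - j)) 2, ← Nat.div_div_eq_div_mul]
          have : (2 * q + r) / 2 = q := by omega
          rw [this]
        rw [he, hdiv]
      · have h0 : k + 1 - 1 - k = 0 := by omega
        have hmod : (2 * q + r) % 2 = r := by omega
        simp [hmod]
    have e0 := hrow 0 (by omega)
    have e1 := hrow 1 (by omega)
    simp only [Nat.add_sub_cancel, Nat.add_zero] at e0 e1 ⊢
    norm_num at e0 e1
    rw [e0, e1]

lemma pvB_eq (n b : Int) (hn : 0 ≤ n) :
    getAllCornersOfHyperrectangle_alt n b = pvCorners b n.toNat := by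
  unfold getAllCornersOfHyperrectangle_alt
  rw [← pvB_nat b n.toNat]
  rw [PySem.List.pyRange_one, PySem.List.pyRange_one]
  have hN : (((2 : Int) ^ n.toNat) - 0).toNat = 2 ^ n.toNat := by
    rw [sub_zero]
    rw [show ((2 : Int) ^ n.toNat) = ((2 ^ n.toNat : Nat) : Int) by push_cast; ring]
    exact Int.toNat_natCast _
  have hn' : (n - 0).toNat = n.toNat := by omega
  rw [hN, hn']
  simp only [List.map_map, zero_add]
  apply List.map_congr_left
  intro i _
  apply List.map_congr_left
  intro j hj
  simp only [Function.comp_apply]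
  have hjn : j < n.toNat := List.mem_range.mp hj
  have hexp : (n - 1 - (j : Int)).toNat = n.toNat - 1 - j := by omega
  rw [hexp]
  have hdiv : PySem.Int.floordiv ((i : Nat) : Int) ((2 : Int) ^ (n.toNat - 1 - j))
      = ((i / 2 ^ (n.toNat - 1 - j) : Nat) : Int) := by
    rw [show ((2 : Int) ^ (n.toNat - 1 - j)) = ((2 ^ (n.toNat - 1 - j) : Nat) : Int) by push_cast; ring]
    exact PySem.Int.floordiv_natCast _ _
  rw [hdiv, show ((2 : Int)) = ((2 : Nat) : Int) by norm_num, PySem.Int.mod_natCast]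
  rcases Nat.mod_two_eq_zero_or_one (i / 2 ^ (n.toNat - 1 - j)) with h | h <;> simp [h]

-- ===== VERDICT (by name: the statement is the Claim_ definition above) =====
theorem getAllCornersOfHyperrectangle_spec : Claim_equal_getAllCornersOfHyperrectangle := by
  intro n b _ hpre
  unfold Pre_getAllCornersOfHyperrectangle at hpre
  unfold Spec_getAllCornersOfHyperrectangle
  rw [pvB_eq n b (by omega),
      pvA_eq b (n.toNat - 1) n hpre (by omega)]
  congr 1
  omega
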